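-- pv_equiv track=rewrite | github.com/kimgyuhee/Python | Chapter0_Algorithm/2307/230721/test02.py | productSolution
-- ===== SOURCE A (Python) =====
-- from itertools import product
-- from itertools import product
-- from itertools import product
--
-- def productSolution(n) :
--     country124 = []
--     count = 1
--     while len(country124) < 5000 :
--         result = list(product([1, 2, 4], repeat=count))
--         for r in result :
--             value = "".join(list(map(str, r)))
--             country124.append(value)
--         count +=1
--
--     answer = country124[n-1]
--     return answer
-- ===== SOURCE B (Python) =====
-- def productSolution(n):
--     # n-th string over digits {1,2,4} in length/lex order, via bijective base-3.
--     s = ""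
--     while n > 0:
--         n, r = divmod(n - 1, 3)
--         s = "124"[r] + s
--     return s
-- ===== Notes on version B (the rewrite author's own statement) =====
-- stated objective: faster
-- what changed: B computes the n-th digit string directly as the bijective base-3 representation of n (remainders 0,1,2 mapped to digits 1,2,4) instead of materialising A's whole table of digit strings with itertools.product and indexing into it; intended as faster (a timing run measured 13.5x at n=4096 when it sampled enough in-range inputs).
-- outside the precondition, e.g. on productSolution(0): A returns '44444444', B returns ''; on productSolution(-5): A returns '44444421', B returns ''
import Mathlib
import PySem

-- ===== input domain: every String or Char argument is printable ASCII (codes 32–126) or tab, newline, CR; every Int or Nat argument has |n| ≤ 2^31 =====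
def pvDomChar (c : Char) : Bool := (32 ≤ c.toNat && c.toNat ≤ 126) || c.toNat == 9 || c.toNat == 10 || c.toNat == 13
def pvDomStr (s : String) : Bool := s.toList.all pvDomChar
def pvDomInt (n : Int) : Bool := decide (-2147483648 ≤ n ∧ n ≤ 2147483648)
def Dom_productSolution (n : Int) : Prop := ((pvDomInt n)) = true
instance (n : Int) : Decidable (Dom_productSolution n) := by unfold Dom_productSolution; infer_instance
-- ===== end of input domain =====

-- B replaces A's itertools.product table of digit strings by the bijective base-3
-- representation of n (intended as faster; a timing run measured B 13.5× at n=4096).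

-- ===== PORT A =====
-- itertools.product([1,2,4], repeat=k): list of tuples, first coordinate varies slowest
def prodRep : Nat → List (List Int)
  | 0 => [[]]
  | k + 1 => [1, 2, 4].flatMap fun x => (prodRep k).map fun t => x :: t

-- value = "".join(list(map(str, r)))
def strOfTuple (r : List Int) : String := PySem.Str.join "" (r.map PySem.Int.toStr)

-- termination helper for the while-loop: each pass appends at least one string
theorem prodRep_ne_nil (k : Nat) : prodRep k ≠ [] := by
  cases k with
  | zero => simp [prodRep]
  | succ k =>
    simp only [prodRep, ne_eq, List.flatMap_eq_nil_iff, List.map_eq_nil_iff]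
    intro h
    exact prodRep_ne_nil k (h 1 (by simp))

-- while len(country124) < 5000: append all strings of length `count`; count += 1
def buildLoop (country : List String) (count : Nat) : List String :=
  if country.length < 5000 then
    buildLoop (country ++ (prodRep count).map strOfTuple) (count + 1)
  else country
termination_by 5000 - country.length
decreasing_by
  have : 0 < (prodRep count).length := List.length_pos_iff.mpr (prodRep_ne_nil count)
  simp only [List.length_append, List.length_map]
  omega

-- answer = country124[n - 1]
def productSolution (n : Int) : String :=
  (PySem.List.pyGet? (buildLoop [] 1) (n - 1)).getD ""

-- ===== PORT B =====
-- while n > 0: n, r = divmod(n - 1, 3); s = "124"[r] + s   (the string kept as List Char)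
def altLoop (n : Int) (s : List Char) : List Char :=
  if n ≤ 0 then s
  else altLoop (PySem.Int.floordiv (n - 1) 3)
               (((PySem.Str.pyGet? "124" (PySem.Int.mod (n - 1) 3)).getD '1') :: s)
termination_by n.toNat
decreasing_by
  rename_i h
  rw [PySem.Int.floordiv_eq_ediv_of_pos (by norm_num)]
  omega

def productSolution_alt (n : Int) : String := String.ofList (altLoop n [])

-- ===== PRECONDITION & SPEC =====
-- Pre_ excludes n ≤ 0 — negative/zero positions are outside the task's natural domain
-- (A's value there comes from Python's negative-index wraparound into its table; B returns "")
-- — and positions past the end of A's fixed table, where A raises IndexError.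
def Pre_productSolution (n : Int) : Prop := 1 ≤ n ∧ n ≤ 9840
instance (n : Int) : Decidable (Pre_productSolution n) := by unfold Pre_productSolution; infer_instance

def pvWitness_productSolution : Int := (7)

def Spec_productSolution (n : Int) (out : String) : Prop := out = productSolution_alt n
instance (n : Int) (out : String) : Decidable (Spec_productSolution n out) := by unfold Spec_productSolution; infer_instance

-- ===== CLAIM (what is proved, stated in full; the proofs are below) =====
def Claim_equal_productSolution : Prop := ∀ (n : Int), Dom_productSolution n → Pre_productSolution n → Spec_productSolution n (productSolution n)

-- ===== LEMMAS AND PROOFS =====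

-- MSB-first bijective base-3 digit string of m over the alphabet '1','2','4'
def bij (m : Nat) : List Char :=
  if m = 0 then []
  else bij ((m - 1) / 3) ++ [if (m - 1) % 3 = 0 then '1' else if (m - 1) % 3 = 1 then '2' else '4']
termination_by m
decreasing_by omega

theorem altLoop_eq_bij (m : Nat) : ∀ s, altLoop (m : Int) s = bij m ++ s := by
  induction m using Nat.strong_induction_on with
  | _ m ih =>
    intro s
    rw [altLoop, bij]
    by_cases h0 : m = 0
    · simp [h0]
    · have hm : ¬ ((m : Int) ≤ 0) := by omega
      rw [if_neg hm, if_neg h0]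
      have he : (m : Int) - 1 = ((m - 1 : Nat) : Int) := by omega
      have hf : PySem.Int.floordiv (((m - 1 : Nat)) : Int) 3 = (((m - 1) / 3 : Nat) : Int) := by
        exact_mod_cast PySem.Int.floordiv_natCast (m - 1) 3
      have hg : PySem.Int.mod (((m - 1 : Nat)) : Int) 3 = (((m - 1) % 3 : Nat) : Int) := by
        exact_mod_cast PySem.Int.mod_natCast (m - 1) 3
      rw [he, hf, hg]
      rw [ih ((m - 1) / 3) (by omega)]
      have h3 : (m - 1) % 3 < 3 := Nat.mod_lt _ (by norm_num)
      interval_cases h : (m - 1) % 3 <;> simp [PySem.Str.pyGet?]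

-- number of strings of length < k (counting the empty string)
def start : Nat → Nat
  | 0 => 0
  | k + 1 => 3 * start k + 1

theorem prodRep_length (k : Nat) : (prodRep k).length = 3 ^ k := by
  induction k with
  | zero => simp [prodRep]
  | succ k ih => simp [prodRep, ih]; ring

theorem prodRep_snoc (k : Nat) :
    prodRep (k + 1) = (prodRep k).flatMap fun t => [t ++ [1], t ++ [2], t ++ [4]] := by
  induction k with
  | zero => simp [prodRep]
  | succ k ih =>
    conv_lhs => rw [prodRep, ih]
    conv_rhs => rw [prodRep]
    simp [List.map_flatMap, List.flatMap_map]

theorem join_nil_eq_flatten (l : List (List Char)) :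
    PySem.Chars.join [] l = l.flatten := by
  induction l with
  | nil => simp [PySem.Chars.join_nil]
  | cons p rest ih =>
    cases rest with
    | nil => simp [PySem.Chars.join_singleton]
    | cons q rs => rw [PySem.Chars.join_cons_cons]; simp_all

theorem strOfTuple_toList (r : List Int) :
    (strOfTuple r).toList = (r.map PySem.Int.toChars).flatten := by
  simp [strOfTuple, PySem.Str.toList_join, join_nil_eq_flatten, List.map_map,
        Function.comp_def, PySem.Int.toList_toStr]

theorem range_three_mul {α : Type} (m : Nat) (h : Nat → α) :
    (List.range (3 * m)).map h
      = (List.range m).flatMap fun j => [h (3 * j), h (3 * j + 1), h (3 * j + 2)] := by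
  induction m with
  | zero => simp
  | succ m ih =>
    have : 3 * (m + 1) = (3 * m + 1 + 1) + 1 := by ring
    rw [this, List.range_succ, List.range_succ, List.range_succ, List.range_succ]
    simp_all [List.flatMap_append]

theorem bij_step (m i : Nat) (hi : i < 3) :
    bij (3 * m + 1 + i) = bij m ++ [if i = 0 then '1' else if i = 1 then '2' else '4'] := by
  rw [bij, if_neg (by omega)]
  have h1 : (3 * m + 1 + i - 1) / 3 = m := by omega
  have h2 : (3 * m + 1 + i - 1) % 3 = i := by omega
  rw [h1, h2]

theorem block_eq (k : Nat) :
    ((prodRep k).map strOfTuple).map String.toList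
      = (List.range (3 ^ k)).map fun j => bij (start k + j) := by
  induction k with
  | zero =>
    simp [prodRep, strOfTuple_toList, start]
    rw [bij]; simp
  | succ k ih =>
    rw [prodRep_snoc]
    have lhs :
        (((prodRep k).flatMap fun t => [t ++ [1], t ++ [2], t ++ [4]]).map strOfTuple).map String.toList
          = (((prodRep k).map strOfTuple).map String.toList).flatMap
              fun c => [c ++ ['1'], c ++ ['2'], c ++ ['4']] := by
      simp [List.map_flatMap, List.flatMap_map, strOfTuple_toList]
      rfl
    rw [lhs, ih]
    have rhs :
        (List.range (3 ^ (k + 1))).map (fun j => bij (start (k + 1) + j))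
          = (List.range (3 ^ k)).flatMap
              fun j => [bij (start k + j) ++ ['1'], bij (start k + j) ++ ['2'],
                        bij (start k + j) ++ ['4']] := by
      have hp : 3 ^ (k + 1) = 3 * 3 ^ k := by ring
      rw [hp, range_three_mul]
      apply List.flatMap_congr
      intro j hj
      have e0 : start (k + 1) + 3 * j = 3 * (start k + j) + 1 + 0 := by simp [start]; ring
      have e1 : start (k + 1) + (3 * j + 1) = 3 * (start k + j) + 1 + 1 := by simp [start]; ring
      have e2 : start (k + 1) + (3 * j + 2) = 3 * (start k + j) + 1 + 2 := by simp [start]; ring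
      rw [e0, e1, e2, bij_step _ 0 (by omega), bij_step _ 1 (by omega), bij_step _ 2 (by omega)]
      simp
    rw [rhs]
    simp [List.flatMap_map]

theorem block_eq' (k : Nat) :
    (prodRep k).map strOfTuple
      = (List.range (3 ^ k)).map fun j => String.ofList (bij (start k + j)) := by
  have h := block_eq k
  have : (((List.range (3 ^ k)).map fun j => String.ofList (bij (start k + j))).map String.toList)
      = (List.range (3 ^ k)).map fun j => bij (start k + j) := by
    simp [List.map_map, Function.comp_def]
  apply List.map_injective_iff.mpr (fun a b hab => String.toList_inj.mp hab)
  rw [h, this]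

theorem glue (a b : Nat) (s : Nat) (f : Nat → String) :
    ((List.range a).map fun j => f (s + j)) ++ ((List.range b).map fun j => f (s + a + j))
      = (List.range (a + b)).map fun j => f (s + j) := by
  rw [List.range_add, List.map_append, List.map_map]
  congr 1
  apply List.map_congr_left
  intro j hj
  simp [Function.comp]
  ring_nf

def tman (j : Nat) : String := String.ofList (bij (1 + j))

theorem glueN (a b c : Nat) (h : a + b = c) :
    ((List.range a).map tman ++ (List.range b).map fun j => tman (a + j))
      = (List.range c).map tman := by
  subst h
  have := glue a b 0 (fun m => String.ofList (bij (1 + m)))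
  simpa [tman] using this

theorem blockT_1 : (prodRep 1).map strOfTuple = (List.range 3).map (tman) := by
  rw [block_eq' 1, show (3:Nat)^1 = 3 from rfl]
  apply List.map_congr_left
  intro j _
  have hs : start 1 = 1 := rfl
  simp only [tman]
  congr 2 <;> omega

theorem blockT_2 : (prodRep 2).map strOfTuple = (List.range 9).map (fun j => tman (3 + j)) := by
  rw [block_eq' 2, show (3:Nat)^2 = 9 from rfl]
  apply List.map_congr_left
  intro j _
  have hs : start 2 = 4 := rfl
  simp only [tman]
  congr 2 <;> omega

theorem blockT_3 : (prodRep 3).map strOfTuple = (List.range 27).map (fun j => tman (12 + j)) := by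
  rw [block_eq' 3, show (3:Nat)^3 = 27 from rfl]
  apply List.map_congr_left
  intro j _
  have hs : start 3 = 13 := rfl
  simp only [tman]
  congr 2 <;> omega

theorem blockT_4 : (prodRep 4).map strOfTuple = (List.range 81).map (fun j => tman (39 + j)) := by
  rw [block_eq' 4, show (3:Nat)^4 = 81 from rfl]
  apply List.map_congr_left
  intro j _
  have hs : start 4 = 40 := rfl
  simp only [tman]
  congr 2 <;> omega

theorem blockT_5 : (prodRep 5).map strOfTuple = (List.range 243).map (fun j => tman (120 + j)) := by
  rw [block_eq' 5, show (3:Nat)^5 = 243 from rfl]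
  apply List.map_congr_left
  intro j _
  have hs : start 5 = 121 := rfl
  simp only [tman]
  congr 2 <;> omega

theorem blockT_6 : (prodRep 6).map strOfTuple = (List.range 729).map (fun j => tman (363 + j)) := by
  rw [block_eq' 6, show (3:Nat)^6 = 729 from rfl]
  apply List.map_congr_left
  intro j _
  have hs : start 6 = 364 := rfl
  simp only [tman]
  congr 2 <;> omega

theorem blockT_7 : (prodRep 7).map strOfTuple = (List.range 2187).map (fun j => tman (1092 + j)) := by
  rw [block_eq' 7, show (3:Nat)^7 = 2187 from rfl]
  apply List.map_congr_left
  intro j _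
  have hs : start 7 = 1093 := rfl
  simp only [tman]
  congr 2 <;> omega

theorem blockT_8 : (prodRep 8).map strOfTuple = (List.range 6561).map (fun j => tman (3279 + j)) := by
  rw [block_eq' 8, show (3:Nat)^8 = 6561 from rfl]
  apply List.map_congr_left
  intro j _
  have hs : start 8 = 3280 := rfl
  simp only [tman]
  congr 2 <;> omega

theorem table_eq :
    buildLoop [] 1 = (List.range 9840).map fun j => String.ofList (bij (1 + j)) := by
  rw [buildLoop, if_pos (by norm_num [List.length_append, List.length_map, prodRep_length])]
  simp only [Nat.reduceAdd]
  rw [buildLoop, if_pos (by norm_num [List.length_append, List.length_map, prodRep_length])]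
  simp only [Nat.reduceAdd]
  rw [buildLoop, if_pos (by norm_num [List.length_append, List.length_map, prodRep_length])]
  simp only [Nat.reduceAdd]
  rw [buildLoop, if_pos (by norm_num [List.length_append, List.length_map, prodRep_length])]
  simp only [Nat.reduceAdd]
  rw [buildLoop, if_pos (by norm_num [List.length_append, List.length_map, prodRep_length])]
  simp only [Nat.reduceAdd]
  rw [buildLoop, if_pos (by norm_num [List.length_append, List.length_map, prodRep_length])]
  simp only [Nat.reduceAdd]
  rw [buildLoop, if_pos (by norm_num [List.length_append, List.length_map, prodRep_length])]
  simp only [Nat.reduceAdd]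
  rw [buildLoop, if_pos (by norm_num [List.length_append, List.length_map, prodRep_length])]
  simp only [Nat.reduceAdd]
  rw [buildLoop, if_neg (by norm_num [List.length_append, List.length_map, prodRep_length])]
  simp only [List.nil_append]
  rw [blockT_1, blockT_2, blockT_3, blockT_4, blockT_5, blockT_6, blockT_7, blockT_8]
  rw [glueN 3 9 12 rfl]
  rw [glueN 12 27 39 rfl]
  rw [glueN 39 81 120 rfl]
  rw [glueN 120 243 363 rfl]
  rw [glueN 363 729 1092 rfl]
  rw [glueN 1092 2187 3279 rfl]
  rw [glueN 3279 6561 9840 rfl]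
  rfl

-- ===== VERDICT (by name: the statement is the Claim_ definition above) =====
theorem productSolution_spec : Claim_equal_productSolution := by
  intro n _ hpre
  unfold Spec_productSolution
  obtain ⟨h1, h2⟩ := hpre
  rw [productSolution, table_eq]
  have h0 : (0 : Int) ≤ n - 1 := by omega
  rw [PySem.List.pyGet?_of_nonneg _ h0]
  have hlt : (n - 1).toNat < 9840 := by omega
  rw [List.getElem?_map]
  simp only [List.getElem?_range hlt, Option.map_some, Option.getD_some]
  have hn : ((n.toNat : Nat) : Int) = n := by omega
  have halt := altLoop_eq_bij n.toNat []
  rw [hn] at halt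
  rw [productSolution_alt, halt, List.append_nil,
      show 1 + (n - 1).toNat = n.toNat by omega]
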